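-- pv_equiv track=rewrite | github.com/Roha-Lee/Algorithm-Study | Programmers/60059.py | solution
-- ===== SOURCE A (Python) =====
-- def rotate(key):
--     row, col = len(key), len(key[0])
--     rotate_key = [[0] * col for _ in range(row)]
--     for r in range(row):
--         for c in range(col):
--             rotate_key[r][c] = key[c][row-1-r]
--     return rotate_key
--
-- def canOpen(key, need_key, dr, dc, num_lock):
--     key_row, key_col = len(key), len(key[0])
--     lock_row, lock_col = len(need_key), len(need_key[0])
--     add = 0
--     for r in range(key_row):
--         for c in range(key_col):
--             nr, nc = r + dr, c + dc
--             if not(0 <= nr < lock_row and 0 <= nc < lock_col):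
--                 continue
--             if key[r][c] == 1 and need_key[nr][nc] == 0:
--                 return False
--             add += 1 if key[r][c] == 1 and need_key[nr][nc] == 1 else 0
--     return add == num_lock
--
-- def solution(key, lock):
--     num_key, num_lock = 0, 0
--     need_key = [[0] * len(lock[0]) for _ in range(len(lock))]
--     key_row, key_col = len(key), len(key[0])
--     lock_row, lock_col = len(lock), len(lock[0])
--     for i in range(key_row):
--         for j in range(key_col):
--             num_key += key[i][j]
--     for i in range(lock_row):
--         for j in range(lock_col):
--             need_key[i][j] = 1 - lock[i][j]
--             num_lock += need_key[i][j]
--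
--     if num_key < num_lock:
--         return False
--
--     # sliding window
--     curr_key = key
--     for _ in range(4):
--         curr_key = rotate(curr_key)
--         for dr in range(-key_row + 1, lock_row):
--             for dc in range(-key_col + 1, lock_col):
--                 if canOpen(curr_key, need_key, dr, dc, num_lock):
--                     return True
--     return False
-- ===== SOURCE B (Python) =====
-- def solution(key, lock):
--     kr, kc = len(key), len(key[0])
--     lr, lc = len(lock), len(lock[0])
--     num_key = sum(sum(row[:kc]) for row in key)
--     num_lock = lr * lc - sum(lock[i][j] for i in range(lr) for j in range(lc))
--     if num_key < num_lock:
--         return False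
--     ones = [(r, c) for r in range(kr) for c in range(kc) if key[r][c] == 1]
--     blocked = [(i, j) for i in range(lr) for j in range(lc) if lock[i][j] == 1]
--     holes = [(i, j) for i in range(lr) for j in range(lc) if lock[i][j] == 0]
--     total = (kr + lr - 1) * (kc + lc - 1)
--     for _ in range(4):
--         ones = [(kr - 1 - c, r) for (r, c) in ones]
--         # cross-correlation by scatter-add: collision / match shift multisets for ALL shifts at once
--         coll_shifts = [(i - r, j - c) for (r, c) in ones for (i, j) in blocked]
--         match_shifts = [(i - r, j - c) for (r, c) in ones for (i, j) in holes]
--         if num_lock == 0: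
--             # need some shift with no collision and no match: count the shifts that have one
--             if len(set(coll_shifts) | set(match_shifts)) < total:
--                 return True
--         else:
--             bad = set(coll_shifts)
--             counts = {}
--             for s in match_shifts:
--                 counts[s] = counts.get(s, 0) + 1
--             for s, m in counts.items():
--                 if m == num_lock and s not in bad:
--                     return True
--     return False
-- ===== Notes on version B (the rewrite author's own statement) =====
-- stated objective: alternative
-- what changed: B removes A's shift-enumeration entirely: instead of rescanning the key grid for every rotation and shift, it computes per rotation the cross-correlation by scatter-add over (key 1-cell, lock cell) pairs - a dictionary of collision shifts and of match shifts keyed by offset - and reads the answer for all shifts off those dictionaries/sets in one pass.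
import Mathlib
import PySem

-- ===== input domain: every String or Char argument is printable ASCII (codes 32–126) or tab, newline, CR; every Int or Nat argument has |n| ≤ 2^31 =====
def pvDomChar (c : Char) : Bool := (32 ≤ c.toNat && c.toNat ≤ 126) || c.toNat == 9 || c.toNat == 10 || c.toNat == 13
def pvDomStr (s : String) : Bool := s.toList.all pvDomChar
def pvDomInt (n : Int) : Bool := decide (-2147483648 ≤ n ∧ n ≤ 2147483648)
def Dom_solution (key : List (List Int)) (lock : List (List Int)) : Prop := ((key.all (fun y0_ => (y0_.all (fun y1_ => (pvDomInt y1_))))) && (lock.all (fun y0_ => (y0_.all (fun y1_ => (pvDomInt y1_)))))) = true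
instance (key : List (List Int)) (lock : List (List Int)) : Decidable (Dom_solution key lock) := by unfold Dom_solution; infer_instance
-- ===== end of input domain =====

-- B replaces A's shift-enumeration search (for every rotation and every shift, rescan the
-- whole key grid) by a scatter-add cross-correlation: per rotation it builds, in ONE pass
-- over (key 1-cell, lock cell) pairs, the multiset of collision shifts and of match shifts,
-- and then reads the answer for ALL shifts off those dictionaries/sets; objective: alternative.

-- ===== PORT A =====

-- Python m[r][c] (exact for the in-range indices A uses under Pre_)
def pvIdx (m : List (List Int)) (r c : Int) : Int :=
  PySem.List.pyGetD (PySem.List.pyGetD m r []) c 0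

-- the (r, c) iteration order of 'for r in range(a): for c in range(b):'
def pvPairs (a b : Int) : List (Int × Int) :=
  (PySem.List.pyRange 0 a 1).flatMap (fun r => (PySem.List.pyRange 0 b 1).map (fun c => (r, c)))

def rotate (keyM : List (List Int)) : List (List Int) :=
  let row := keyM.length
  let col := (PySem.List.pyGetD keyM 0 []).length
  (PySem.List.pyRange 0 row 1).map (fun r =>
    (PySem.List.pyRange 0 col 1).map (fun c => pvIdx keyM c ((row : Int) - 1 - r)))

-- canOpen's nested loops with the early 'return False' (none = returned False)
def canOpenGo (keyM need : List (List Int)) (dr dc lr lc : Int) :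
    List (Int × Int) → Int → Option Int
  | [], add => some add
  | (r, c) :: rest, add =>
      if ¬(0 ≤ r + dr ∧ r + dr < lr ∧ 0 ≤ c + dc ∧ c + dc < lc) then
        canOpenGo keyM need dr dc lr lc rest add
      else if pvIdx keyM r c = 1 ∧ pvIdx need (r + dr) (c + dc) = 0 then none
      else canOpenGo keyM need dr dc lr lc rest
        (add + if pvIdx keyM r c = 1 ∧ pvIdx need (r + dr) (c + dc) = 1 then 1 else 0)

def canOpen (keyM need : List (List Int)) (dr dc numLock : Int) : Bool :=
  match canOpenGo keyM need dr dc (need.length : Int) ((PySem.List.pyGetD need 0 []).length : Int)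
      (pvPairs (keyM.length : Int) ((PySem.List.pyGetD keyM 0 []).length : Int)) 0 with
  | none => false
  | some add => add == numLock

-- 'for _ in range(4):' with the early 'return True'
def tryRot (needK : List (List Int)) (numLock kr kc lr lc : Int) :
    Nat → List (List Int) → Bool
  | 0, _ => false
  | n + 1, curr =>
      let curr' := rotate curr
      if (PySem.List.pyRange (-kr + 1) lr 1).any (fun dr =>
           (PySem.List.pyRange (-kc + 1) lc 1).any (fun dc =>
             canOpen curr' needK dr dc numLock)) then true
      else tryRot needK numLock kr kc lr lc n curr'

def solution (key : List (List Int)) (lock : List (List Int)) : Bool :=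
  let kr : Int := key.length
  let kc : Int := (PySem.List.pyGetD key 0 []).length
  let lr : Int := lock.length
  let lc : Int := (PySem.List.pyGetD lock 0 []).length
  let needK := (PySem.List.pyRange 0 lr 1).map (fun i =>
    (PySem.List.pyRange 0 lc 1).map (fun j => 1 - pvIdx lock i j))
  let numKey := (pvPairs kr kc).foldl (fun acc p => acc + pvIdx key p.1 p.2) 0
  let numLock := (pvPairs lr lc).foldl (fun acc p => acc + (1 - pvIdx lock p.1 p.2)) 0
  if numKey < numLock then false
  else tryRot needK numLock kr kc lr lc 4 key

-- ===== PORT B =====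

-- [(r, c) for r in range(kr) for c in range(kc) if key[r][c] == 1]
def pvOnes (keyM : List (List Int)) (kr kc : Int) : List (Int × Int) :=
  (pvPairs kr kc).filter (fun p => pvIdx keyM p.1 p.2 == 1)

-- [(i - r, j - c) for (r, c) in ones for (i, j) in cells]
def pvDiffs (ones cells : List (Int × Int)) : List (Int × Int) :=
  ones.flatMap (fun o => cells.map (fun b => (b.1 - o.1, b.2 - o.2)))

-- B's rotation loop: per rotation, the collision- and match-shift multisets of ALL shifts
-- at once, then one read of the dictionaries/sets (no shift enumeration)
def altLoop (blocked holes : List (Int × Int)) (numLock kr total : Int) :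
    Nat → List (Int × Int) → Bool
  | 0, _ => false
  | n + 1, ones =>
      let ones' := ones.map (fun q => (kr - 1 - q.2, q.1))
      let collShifts := pvDiffs ones' blocked
      let matchShifts := pvDiffs ones' holes
      let hit :=
        if numLock == 0 then
          decide (((PySem.Set.union (PySem.Set.ofList collShifts) matchShifts).length : Int) < total)
        else
          ((matchShifts.foldl (fun d s => d.insert s (d.getD s 0 + 1))
              (PySem.Dict.empty : PySem.Dict (Int × Int) Int)).items.any
            (fun sm => sm.2 == numLock && !((PySem.Set.ofList collShifts).contains sm.1)))
      if hit then true else altLoop blocked holes numLock kr total n ones'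

def solution_alt (key : List (List Int)) (lock : List (List Int)) : Bool :=
  let kr : Int := key.length
  let kc : Int := (key.headD []).length
  let lr : Int := lock.length
  let lc : Int := (lock.headD []).length
  let numKey := (key.map (fun row => (PySem.List.slice row none (some kc)).sum)).sum
  let numLock := lr * lc - ((pvPairs lr lc).map (fun p => pvIdx lock p.1 p.2)).sum
  if numKey < numLock then false
  else
    let ones := pvOnes key kr kc
    let blocked := (pvPairs lr lc).filter (fun p => pvIdx lock p.1 p.2 == 1)
    let holes := (pvPairs lr lc).filter (fun p => pvIdx lock p.1 p.2 == 0)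
    let total := (kr + lr - 1) * (kc + lc - 1)
    altLoop blocked holes numLock kr total 4 ones

-- ===== PRECONDITION & SPEC =====
-- Pre_ excludes the inputs on which A raises IndexError: an empty key or lock, a key/lock
-- row shorter than its first row (the counting loops raise), and — unless the num_key <
-- num_lock early exit fires first or the key has no columns — a key that is not a square
-- with rows at least key-height long (rotate raises).  It also excludes rare non-square
-- keys on which A happens to return True in the first rotation before rotate can raise.
def Pre_solution (key : List (List Int)) (lock : List (List Int)) : Prop :=
  key ≠ [] ∧ lock ≠ [] ∧
  (∀ row ∈ key, (key.headD []).length ≤ row.length) ∧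
  (∀ row ∈ lock, (lock.headD []).length ≤ row.length) ∧
  ((key.map (fun row => (row.take (key.headD []).length).sum)).sum <
      (lock.length : Int) * ((lock.headD []).length : Int) -
        (lock.map (fun row => (row.take (lock.headD []).length).sum)).sum ∨
    (key.headD []).length = 0 ∨
    ((key.headD []).length = key.length ∧ ∀ row ∈ key, key.length ≤ row.length))
instance (key : List (List Int)) (lock : List (List Int)) : Decidable (Pre_solution key lock) := by
  unfold Pre_solution; infer_instance

def pvWitness_solution : List (List Int) × List (List Int) := ([[1]], [[0]])

def Spec_solution (key : List (List Int)) (lock : List (List Int)) (out : Bool) : Prop := out = solution_alt key lock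
instance (key : List (List Int)) (lock : List (List Int)) (out : Bool) : Decidable (Spec_solution key lock out) := by unfold Spec_solution; infer_instance

-- ===== CLAIM (what is proved, stated in full; the proofs are below) =====
def Claim_equal_solution : Prop := ∀ (key : List (List Int)) (lock : List (List Int)), Dom_solution key lock → Pre_solution key lock → Spec_solution key lock (solution key lock)

-- ===== LEMMAS AND PROOFS =====

theorem pvIdx_natCast (m : List (List Int)) (r c : Nat) :
    pvIdx m (r : Int) (c : Int) = (m.getD r []).getD c 0 := by
  simp [pvIdx]

theorem pyRange_map {α : Type} (m : Nat) (f : Int → α) :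
    (PySem.List.pyRange 0 (m : Int) 1).map f = (List.range m).map (fun k => f (k : Nat)) := by
  rw [PySem.List.pyRange_one, List.map_map]
  norm_num [Function.comp_def]

theorem pvPairs_natCast (a b : Nat) :
    pvPairs (a : Int) (b : Int) =
      (List.range a).flatMap (fun r => (List.range b).map (fun c : Nat => (((r : Nat) : Int), ((c : Nat) : Int)))) := by
  unfold pvPairs
  rw [List.flatMap_def, pyRange_map, ← List.flatMap_def]
  congr 1
  funext r
  rw [pyRange_map]

theorem mem_pvPairs {a b : Int} {p : Int × Int} :
    p ∈ pvPairs a b ↔ 0 ≤ p.1 ∧ p.1 < a ∧ 0 ≤ p.2 ∧ p.2 < b := by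
  simp only [pvPairs, List.mem_flatMap, List.mem_map, PySem.List.mem_pyRange_one]
  constructor
  · rintro ⟨r, hr, c, hc, rfl⟩; exact ⟨hr.1, hr.2, hc.1, hc.2⟩
  · rintro ⟨h1, h2, h3, h4⟩; exact ⟨p.1, ⟨h1, h2⟩, p.2, ⟨h3, h4⟩, rfl⟩

theorem nodup_pvPairs (a b : Int) : (pvPairs a b).Nodup := by
  unfold pvPairs
  rw [List.nodup_flatMap]
  refine ⟨fun r _ => ?_, ?_⟩
  · exact (PySem.List.nodup_pyRange_one 0 b).map (fun x y h => by simpa [Prod.ext_iff] using h)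
  · refine (PySem.List.nodup_pyRange_one 0 a).imp ?_
    intro r r' hne z hz hz'
    simp only [List.mem_map] at hz hz'
    obtain ⟨c, _, rfl⟩ := hz
    obtain ⟨c', _, h⟩ := hz'
    exact hne ((Prod.mk.injEq _ _ _ _).mp h).1.symm

theorem length_pvPairs (a b : Nat) : (pvPairs (a : Int) (b : Int)).length = a * b := by
  rw [pvPairs_natCast]
  simp [List.length_flatMap]

theorem sum_one_sub (l : List (Int × Int)) (f : Int × Int → Int) :
    ((l.map (fun p => 1 - f p)).sum) = (l.length : Int) - (l.map f).sum := by
  induction l with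
  | nil => simp
  | cons p rest ih => simp [ih]; omega

theorem sum_getD_range_row (row : List Int) (m : Nat) :
    ((List.range m).map (fun c => row.getD c 0)).sum = (row.take m).sum := by
  induction m with
  | zero => simp
  | succ k ih =>
    rw [List.range_succ, List.map_append, List.sum_append, List.take_add_one, List.sum_append, ih]
    cases h : row[k]? <;> simp [List.getD_eq_getElem?_getD, h]

theorem map_range_getD {β : Type} (l : List (List Int)) (g : List Int → β) :
    (List.range l.length).map (fun r => g (l.getD r [])) = l.map g := by
  apply List.ext_getElem
  · simp
  · intro i h1 h2
    simp [List.getD_eq_getElem?_getD, List.getElem?_eq_getElem (by simpa using h1)]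

def badA (keyM need : List (List Int)) (dr dc lr lc : Int) (p : Int × Int) : Bool :=
  decide ((0 ≤ p.1 + dr ∧ p.1 + dr < lr ∧ 0 ≤ p.2 + dc ∧ p.2 + dc < lc) ∧
    pvIdx keyM p.1 p.2 = 1 ∧ pvIdx need (p.1 + dr) (p.2 + dc) = 0)
def goodA (keyM need : List (List Int)) (dr dc lr lc : Int) (p : Int × Int) : Bool :=
  decide ((0 ≤ p.1 + dr ∧ p.1 + dr < lr ∧ 0 ≤ p.2 + dc ∧ p.2 + dc < lc) ∧
    pvIdx keyM p.1 p.2 = 1 ∧ pvIdx need (p.1 + dr) (p.2 + dc) = 1)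

theorem canOpenGo_char (keyM need : List (List Int)) (dr dc lr lc : Int)
    (ps : List (Int × Int)) (add : Int) :
    canOpenGo keyM need dr dc lr lc ps add =
      if ps.any (badA keyM need dr dc lr lc) then none
      else some (add + (ps.countP (goodA keyM need dr dc lr lc) : Int)) := by
  induction ps generalizing add with
  | nil => simp [canOpenGo]
  | cons p rest ih =>
    obtain ⟨r, c⟩ := p
    rw [canOpenGo]
    by_cases hb : (0 ≤ r + dr ∧ r + dr < lr ∧ 0 ≤ c + dc ∧ c + dc < lc)
    · by_cases hk : (pvIdx keyM r c = 1 ∧ pvIdx need (r + dr) (c + dc) = 0)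
      · simp [hb, hk, badA, List.any_cons]
      · rw [if_neg (by simp [hb]), if_neg hk, ih]
        have h1 : badA keyM need dr dc lr lc (r, c) = false := by
          simp only [badA, decide_eq_false_iff_not]; tauto
        simp only [List.any_cons, List.countP_cons, h1, Bool.false_or]
        have hg2 : goodA keyM need dr dc lr lc (r, c) =
            decide (pvIdx keyM r c = 1 ∧ pvIdx need (r + dr) (c + dc) = 1) := by
          simp [goodA, hb]
        by_cases hg : (pvIdx keyM r c = 1 ∧ pvIdx need (r + dr) (c + dc) = 1) <;>
          simp only [hg2, hg, decide_false, if_false] <;>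
          split_ifs <;> first
            | rfl
            | (congr 1; push_cast; omega)
            | (exfalso; tauto)
    · rw [if_pos (by simp [hb]), ih]
      have h1 : badA keyM need dr dc lr lc (r, c) = false := by
        simp only [badA, decide_eq_false_iff_not]; tauto
      have h2 : goodA keyM need dr dc lr lc (r, c) = false := by
        simp only [goodA, decide_eq_false_iff_not]; tauto
      simp only [List.any_cons, List.countP_cons, h1, h2, Bool.false_or, Bool.false_eq_true,
        if_false, add_zero]

def needKOf (lock : List (List Int)) (lr lc : Int) : List (List Int) :=
  (PySem.List.pyRange 0 lr 1).map (fun i =>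
    (PySem.List.pyRange 0 lc 1).map (fun j => 1 - pvIdx lock i j))
def blockedOf (lock : List (List Int)) (lr lc : Int) : List (Int × Int) :=
  (pvPairs lr lc).filter (fun p => pvIdx lock p.1 p.2 == 1)
def holesOf (lock : List (List Int)) (lr lc : Int) : List (Int × Int) :=
  (pvPairs lr lc).filter (fun p => pvIdx lock p.1 p.2 == 0)

theorem pvIdx_needKOf (lock : List (List Int)) (lr lc i j : Int)
    (hi : 0 ≤ i ∧ i < lr) (hj : 0 ≤ j ∧ j < lc) :
    pvIdx (needKOf lock lr lc) i j = 1 - pvIdx lock i j := by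
  unfold pvIdx needKOf
  rw [PySem.List.pyGetD_map_pyRange_of_nonneg _ lr i _ hi.1 hi.2,
    PySem.List.pyGetD_map_pyRange_of_nonneg _ lc j _ hj.1 hj.2]
  simp [pvIdx]

theorem length_needKOf (lock : List (List Int)) (lr lc : Int) (h : 0 ≤ lr) :
    ((needKOf lock lr lc).length : Int) = lr := by
  simp [needKOf, PySem.List.length_pyRange_one]
  omega

theorem head_needKOf (lock : List (List Int)) (lr lc : Int) (h : 0 < lr) (hc : 0 ≤ lc) :
    ((PySem.List.pyGetD (needKOf lock lr lc) 0 []).length : Int) = lc := by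
  unfold needKOf
  rw [PySem.List.pyGetD_map_pyRange_of_nonneg _ lr 0 _ le_rfl h]
  simp [PySem.List.length_pyRange_one]
  omega

theorem mem_blockedOf {lock : List (List Int)} {lr lc : Int} {q : Int × Int} :
    q ∈ blockedOf lock lr lc ↔
      (0 ≤ q.1 ∧ q.1 < lr ∧ 0 ≤ q.2 ∧ q.2 < lc) ∧ pvIdx lock q.1 q.2 = 1 := by
  simp only [blockedOf, List.mem_filter, mem_pvPairs, beq_iff_eq]

theorem mem_holesOf {lock : List (List Int)} {lr lc : Int} {q : Int × Int} :
    q ∈ holesOf lock lr lc ↔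
      (0 ≤ q.1 ∧ q.1 < lr ∧ 0 ≤ q.2 ∧ q.2 < lc) ∧ pvIdx lock q.1 q.2 = 0 := by
  simp only [holesOf, List.mem_filter, mem_pvPairs, beq_iff_eq]

def pvSq (M : List (List Int)) (n : Nat) : Prop :=
  M.length = n ∧ (PySem.List.pyGetD M 0 []).length = n ∧ ∀ row ∈ M, n ≤ row.length

theorem rotate_length (M : List (List Int)) : (rotate M).length = M.length := by
  simp [rotate, PySem.List.length_pyRange_one]

theorem rotate_idx (M : List (List Int)) (r c : Int)
    (hr : 0 ≤ r ∧ r < (M.length : Int))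
    (hc : 0 ≤ c ∧ c < ((PySem.List.pyGetD M 0 []).length : Int)) :
    pvIdx (rotate M) r c = pvIdx M c ((M.length : Int) - 1 - r) := by
  conv_lhs => rw [pvIdx, rotate]
  rw [PySem.List.pyGetD_map_pyRange_of_nonneg _ _ r _ hr.1 hr.2,
    PySem.List.pyGetD_map_pyRange_of_nonneg _ _ c _ hc.1 hc.2]

theorem pvSq_rotate {M : List (List Int)} {n : Nat} (h : pvSq M n) (hn : 0 < n) :
    pvSq (rotate M) n := by
  obtain ⟨h1, h2, h3⟩ := h
  refine ⟨by simp [rotate_length, h1], ?_, ?_⟩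
  · conv_lhs => rw [rotate]
    rw [PySem.List.pyGetD_map_pyRange_of_nonneg _ _ 0 _ le_rfl (by simp [h1]; omega)]
    simp [PySem.List.length_pyRange_one, h2]
  · intro row hrow
    simp only [rotate, List.mem_map] at hrow
    obtain ⟨r, _, rfl⟩ := hrow
    simp [PySem.List.length_pyRange_one, h2]

theorem nodup_pvOnes (M : List (List Int)) (a b : Int) : (pvOnes M a b).Nodup :=
  (nodup_pvPairs a b).filter _

theorem mem_pvOnes {M : List (List Int)} {a b : Int} {p : Int × Int} :
    p ∈ pvOnes M a b ↔ (0 ≤ p.1 ∧ p.1 < a ∧ 0 ≤ p.2 ∧ p.2 < b) ∧ pvIdx M p.1 p.2 = 1 := by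
  simp only [pvOnes, List.mem_filter, mem_pvPairs, beq_iff_eq]

theorem ones_rot {M : List (List Int)} {n : Nat} (h : pvSq M n) (_hn : 0 < n) :
    ((pvOnes M (n : Int) (n : Int)).map (fun q => ((n : Int) - 1 - q.2, q.1))).Perm
      (pvOnes (rotate M) (n : Int) (n : Int)) := by
  obtain ⟨h1, h2, h3⟩ := h
  apply (List.perm_ext_iff_of_nodup ?_ (nodup_pvOnes _ _ _)).mpr
  · intro q
    simp only [List.mem_map, mem_pvOnes]
    constructor
    · rintro ⟨p, ⟨hp, hv⟩, rfl⟩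
      refine ⟨⟨by omega, by omega, by omega, by omega⟩, ?_⟩
      rw [rotate_idx M _ _ (by omega) (by omega)]
      have : (M.length : Int) - 1 - ((n : Int) - 1 - p.2) = p.2 := by omega
      rw [this]
      exact hv
    · rintro ⟨hq, hv⟩
      refine ⟨(q.2, (n : Int) - 1 - q.1), ⟨⟨by omega, by omega, by omega, by omega⟩, ?_⟩, ?_⟩
      · rw [rotate_idx M _ _ (by omega) (by omega)] at hv
        have : (M.length : Int) - 1 - q.1 = (n : Int) - 1 - q.1 := by omega
        rw [this] at hv
        exact hv
      · exact Prod.ext (by omega) rfl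
  · apply List.Nodup.map ?_ (nodup_pvOnes _ _ _)
    intro x y hxy
    have h := (Prod.mk.injEq _ _ _ _).mp hxy
    have h1 := h.1
    exact Prod.ext h.2 (by omega)

-- ---- one shift: A's canOpen characterized over the 1-positions ----

theorem shift_eq (lock : List (List Int)) (lr lc : Nat) (hlr : 0 < lr)
    (M : List (List Int)) (n : Nat) (hSq : pvSq M n)
    (L : List (Int × Int)) (hL : L.Perm (pvOnes M (n : Int) (n : Int)))
    (dr dc numLock : Int) :
    canOpen M (needKOf lock (lr : Int) (lc : Int)) dr dc numLock =
      (if L.any (fun q => (blockedOf lock (lr : Int) (lc : Int)).contains (q.1 + dr, q.2 + dc)) then false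
       else ((L.countP (fun q => (holesOf lock (lr : Int) (lc : Int)).contains (q.1 + dr, q.2 + dc)) : Int) == numLock)) := by
  obtain ⟨hM1, hM2, hM3⟩ := hSq
  unfold canOpen
  rw [hM1, hM2, length_needKOf lock _ _ (by positivity),
    head_needKOf lock _ _ (by exact_mod_cast hlr) (by positivity),
    canOpenGo_char]
  have hbadeq : ((pvPairs (n : Int) (n : Int)).any (badA M (needKOf lock (lr : Int) (lc : Int)) dr dc (lr : Int) (lc : Int))) =
      (L.any (fun q => (blockedOf lock (lr : Int) (lc : Int)).contains (q.1 + dr, q.2 + dc))) := by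
    rw [Bool.eq_iff_iff]
    simp only [List.any_eq_true]
    constructor
    · rintro ⟨p, hp, hbad⟩
      rw [badA, decide_eq_true_eq] at hbad
      obtain ⟨hin, hv, hneed⟩ := hbad
      rw [pvIdx_needKOf lock _ _ _ _ ⟨hin.1, hin.2.1⟩ ⟨hin.2.2.1, hin.2.2.2⟩] at hneed
      refine ⟨p, hL.mem_iff.mpr (mem_pvOnes.mpr ⟨mem_pvPairs.mp hp, hv⟩), ?_⟩
      simp only [List.contains_iff_mem]
      refine mem_blockedOf.mpr ⟨by simpa using hin, ?_⟩
      simpa using (show pvIdx lock (p.1 + dr) (p.2 + dc) = 1 by omega)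
    · rintro ⟨q, hq, hc⟩
      simp only [List.contains_iff_mem] at hc
      obtain ⟨hin', hlk'⟩ := mem_blockedOf.mp hc
      have hin : 0 ≤ q.1 + dr ∧ q.1 + dr < (lr : Int) ∧ 0 ≤ q.2 + dc ∧ q.2 + dc < (lc : Int) := by
        simpa using hin'
      have hlk : pvIdx lock (q.1 + dr) (q.2 + dc) = 1 := by simpa using hlk'
      obtain ⟨hb, hv⟩ := mem_pvOnes.mp (hL.mem_iff.mp hq)
      refine ⟨q, mem_pvPairs.mpr hb, ?_⟩
      rw [badA, decide_eq_true_eq]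
      refine ⟨hin, hv, ?_⟩
      rw [pvIdx_needKOf lock _ _ _ _ ⟨hin.1, hin.2.1⟩ ⟨hin.2.2.1, hin.2.2.2⟩]
      omega
  have hcnteq : ((pvPairs (n : Int) (n : Int)).countP (goodA M (needKOf lock (lr : Int) (lc : Int)) dr dc (lr : Int) (lc : Int))) =
      (L.countP (fun q => (holesOf lock (lr : Int) (lc : Int)).contains (q.1 + dr, q.2 + dc))) := by
    rw [hL.countP_eq, pvOnes, List.countP_filter]
    apply List.countP_congr
    intro p hp
    simp only [goodA, decide_eq_true_eq, Bool.and_eq_true, beq_iff_eq, List.contains_iff_mem,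
      mem_holesOf]
    constructor
    · rintro ⟨hin, hv, hneed⟩
      rw [pvIdx_needKOf lock _ _ _ _ ⟨hin.1, hin.2.1⟩ ⟨hin.2.2.1, hin.2.2.2⟩] at hneed
      refine ⟨⟨by simpa using hin, ?_⟩, hv⟩
      simpa using (show pvIdx lock (p.1 + dr) (p.2 + dc) = 0 by omega)
    · rintro ⟨⟨hin', hlk'⟩, hv⟩
      have hin : 0 ≤ p.1 + dr ∧ p.1 + dr < (lr : Int) ∧ 0 ≤ p.2 + dc ∧ p.2 + dc < (lc : Int) := by
        simpa using hin'
      have hlk : pvIdx lock (p.1 + dr) (p.2 + dc) = 0 := by simpa using hlk'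
      refine ⟨hin, hv, ?_⟩
      rw [pvIdx_needKOf lock _ _ _ _ ⟨hin.1, hin.2.1⟩ ⟨hin.2.2.1, hin.2.2.2⟩]
      omega
  rw [hbadeq, hcnteq]
  split_ifs with h
  · rfl
  · simp

-- ---- the shift multisets ----

theorem mem_pvDiffs {L cells : List (Int × Int)} {s : Int × Int} :
    s ∈ pvDiffs L cells ↔ ∃ q ∈ L, (q.1 + s.1, q.2 + s.2) ∈ cells := by
  simp only [pvDiffs, List.mem_flatMap, List.mem_map]
  constructor
  · rintro ⟨q, hq, b, hb, rfl⟩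
    refine ⟨q, hq, ?_⟩
    simpa using (show (q.1 + (b.1 - q.1), q.2 + (b.2 - q.2)) = b by
      exact Prod.ext (by ring) (by ring)) ▸ hb
  · rintro ⟨q, hq, hb⟩
    exact ⟨q, hq, _, hb, Prod.ext (by simp) (by simp)⟩

theorem count_pvDiffs (L cells : List (Int × Int)) (h : cells.Nodup) (s : Int × Int) :
    (pvDiffs L cells).count s =
      L.countP (fun q => cells.contains (q.1 + s.1, q.2 + s.2)) := by
  induction L with
  | nil => simp [pvDiffs]
  | cons q rest ih =>
    rw [show pvDiffs (q :: rest) cells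
        = cells.map (fun b => (b.1 - q.1, b.2 - q.2)) ++ pvDiffs rest cells from rfl,
      List.count_append, List.countP_cons, ih]
    have hmap : (cells.map (fun b => (b.1 - q.1, b.2 - q.2))).count s
        = cells.count (q.1 + s.1, q.2 + s.2) := by
      rw [List.count, List.countP_map, List.count]
      apply List.countP_congr
      intro b _
      simp only [Function.comp_apply, beq_iff_eq, Prod.ext_iff]
      constructor <;> intro hh <;> constructor <;> omega
    rw [hmap]
    by_cases hmem : (q.1 + s.1, q.2 + s.2) ∈ cells
    · rw [List.count_eq_one_of_mem h hmem]
      simp [hmem]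
      omega
    · rw [List.count_eq_zero_of_not_mem hmem]
      simp [hmem]

theorem nodup_holesOf (lock : List (List Int)) (lr lc : Int) : (holesOf lock lr lc).Nodup :=
  (nodup_pvPairs lr lc).filter _

-- bounds of every shift produced by pvDiffs from in-square ones and in-lock cells
theorem pvDiffs_bounds {M : List (List Int)} {n lr lc : Nat}
    {L : List (Int × Int)} (hL : L.Perm (pvOnes M (n : Int) (n : Int)))
    {cells : List (Int × Int)}
    (hcells : ∀ q ∈ cells, 0 ≤ q.1 ∧ q.1 < (lr : Int) ∧ 0 ≤ q.2 ∧ q.2 < (lc : Int))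
    {s : Int × Int} (hs : s ∈ pvDiffs L cells) :
    (-(n : Int) + 1 ≤ s.1 ∧ s.1 < lr) ∧ (-(n : Int) + 1 ≤ s.2 ∧ s.2 < lc) := by
  obtain ⟨q, hq, hb⟩ := mem_pvDiffs.mp hs
  obtain ⟨hqb, _⟩ := mem_pvOnes.mp (hL.mem_iff.mp hq)
  have := hcells _ hb
  simp only at this
  constructor <;> constructor <;> omega


def pvRect (a b c d : Int) : List (Int × Int) :=
  (PySem.List.pyRange a b 1).flatMap (fun r => (PySem.List.pyRange c d 1).map (fun cc => (r, cc)))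

theorem mem_pvRect {a b c d : Int} {p : Int × Int} :
    p ∈ pvRect a b c d ↔ (a ≤ p.1 ∧ p.1 < b) ∧ (c ≤ p.2 ∧ p.2 < d) := by
  simp only [pvRect, List.mem_flatMap, List.mem_map, PySem.List.mem_pyRange_one]
  constructor
  · rintro ⟨r, hr, c', hc, rfl⟩; exact ⟨hr, hc⟩
  · rintro ⟨h1, h2⟩; exact ⟨p.1, h1, p.2, h2, rfl⟩

theorem nodup_pvRect (a b c d : Int) : (pvRect a b c d).Nodup := by
  unfold pvRect
  rw [List.nodup_flatMap]
  refine ⟨fun r _ => ?_, ?_⟩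
  · exact (PySem.List.nodup_pyRange_one c d).map (fun x y h => by simpa [Prod.ext_iff] using h)
  · refine (PySem.List.nodup_pyRange_one a b).imp ?_
    intro r r' hne z hz hz'
    simp only [List.mem_map] at hz hz'
    obtain ⟨c1, _, rfl⟩ := hz
    obtain ⟨c2, _, h⟩ := hz'
    exact hne ((Prod.mk.injEq _ _ _ _).mp h).1.symm

theorem length_pvRect (a b c d : Int) :
    (pvRect a b c d).length = (b - a).toNat * (d - c).toNat := by
  simp [pvRect, List.length_flatMap, PySem.List.length_pyRange_one, List.map_const', List.sum_replicate, smul_eq_mul]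

theorem count_missing {α : Type} [DecidableEq α] {u R : List α} (hu : u.Nodup)
    (hR : R.Nodup) (hsub : u ⊆ R) : u.length < R.length ↔ ∃ s ∈ R, s ∉ u := by
  have hcu : u.toFinset.card = u.length := List.toFinset_card_of_nodup hu
  have hcR : R.toFinset.card = R.length := List.toFinset_card_of_nodup hR
  constructor
  · intro hlen
    by_contra hno
    push Not at hno
    have hRu : R.toFinset ⊆ u.toFinset := fun x hx =>
      List.mem_toFinset.mpr (hno _ (List.mem_toFinset.mp hx))
    have := Finset.card_le_card hRu
    omega
  · rintro ⟨s, hsR, hsu⟩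
    have hss : u.toFinset ⊂ R.toFinset := by
      refine ⟨fun x hx => List.mem_toFinset.mpr (hsub (List.mem_toFinset.mp hx)), fun hcon => ?_⟩
      exact hsu (List.mem_toFinset.mp (hcon (List.mem_toFinset.mpr hsR)))
    have := Finset.card_lt_card hss
    omega

-- ---- one rotation: A's shift scan = B's dictionary read ----

theorem guard_eq (lock : List (List Int)) (lr lc : Nat) (hlr : 0 < lr)
    (M : List (List Int)) (n : Nat) (hn : 0 < n) (hSq : pvSq M n)
    (L : List (Int × Int)) (hL : L.Perm (pvOnes M (n : Int) (n : Int)))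
    (numLock : Int) :
    ((PySem.List.pyRange (-(n : Int) + 1) lr 1).any (fun dr =>
       (PySem.List.pyRange (-(n : Int) + 1) lc 1).any (fun dc =>
         canOpen M (needKOf lock (lr : Int) (lc : Int)) dr dc numLock)))
    = (if numLock == 0 then
         decide (((PySem.Set.union (PySem.Set.ofList (pvDiffs L (blockedOf lock (lr : Int) (lc : Int))))
             (pvDiffs L (holesOf lock (lr : Int) (lc : Int)))).length : Int)
           < ((n : Int) + lr - 1) * ((n : Int) + lc - 1))
       else
         (((pvDiffs L (holesOf lock (lr : Int) (lc : Int))).foldl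
             (fun d s => d.insert s (d.getD s 0 + 1))
             (PySem.Dict.empty : PySem.Dict (Int × Int) Int)).items.any
           (fun sm => sm.2 == numLock &&
             !((PySem.Set.ofList (pvDiffs L (blockedOf lock (lr : Int) (lc : Int)))).contains sm.1)))) := by
  have hmemColl : ∀ dr dc : Int,
      (L.any (fun q => (blockedOf lock (lr : Int) (lc : Int)).contains (q.1 + dr, q.2 + dc)) = true)
        ↔ (dr, dc) ∈ pvDiffs L (blockedOf lock (lr : Int) (lc : Int)) := by
    intro dr dc
    rw [List.any_eq_true]
    constructor
    · rintro ⟨q, hq, hcq⟩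
      exact mem_pvDiffs.mpr ⟨q, hq, by simpa [List.contains_iff_mem] using hcq⟩
    · intro hm
      obtain ⟨q, hq, hb⟩ := mem_pvDiffs.mp hm
      exact ⟨q, hq, by simpa [List.contains_iff_mem] using hb⟩
  have hcnt : ∀ dr dc : Int,
      (L.countP (fun q => (holesOf lock (lr : Int) (lc : Int)).contains (q.1 + dr, q.2 + dc)))
        = (pvDiffs L (holesOf lock (lr : Int) (lc : Int))).count (dr, dc) := by
    intro dr dc
    rw [count_pvDiffs L _ (nodup_holesOf lock _ _) (dr, dc)]
  have hkey : ∀ dr dc : Int,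
      (canOpen M (needKOf lock (lr : Int) (lc : Int)) dr dc numLock = true)
        ↔ ((dr, dc) ∉ pvDiffs L (blockedOf lock (lr : Int) (lc : Int)) ∧
            (((pvDiffs L (holesOf lock (lr : Int) (lc : Int))).count (dr, dc) : Int) = numLock)) := by
    intro dr dc
    rw [shift_eq lock lr lc hlr M n hSq L hL dr dc numLock]
    by_cases hbad : L.any (fun q =>
        (blockedOf lock (lr : Int) (lc : Int)).contains (q.1 + dr, q.2 + dc)) = true
    · rw [if_pos hbad]
      simp only [Bool.false_eq_true, false_iff, not_and]
      exact fun hnc _ => hnc ((hmemColl dr dc).mp hbad)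
    · rw [if_neg hbad]
      simp only [beq_iff_eq, hcnt]
      exact ⟨fun h => ⟨fun hm => hbad ((hmemColl dr dc).mpr hm), h⟩, fun h => h.2⟩
  have hsubU : (PySem.Set.union (PySem.Set.ofList (pvDiffs L (blockedOf lock (lr : Int) (lc : Int))))
        (pvDiffs L (holesOf lock (lr : Int) (lc : Int))))
      ⊆ pvRect (-(n : Int) + 1) lr (-(n : Int) + 1) lc := by
    intro x hx
    rcases (PySem.Set.mem_union _ _ _).mp hx with h | h
    · have hb := pvDiffs_bounds (lr := lr) (lc := lc) hL
        (fun q hq => (mem_blockedOf.mp hq).1) ((PySem.Set.mem_ofList _ _).mp h)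
      exact mem_pvRect.mpr ⟨hb.1, hb.2⟩
    · have hb := pvDiffs_bounds (lr := lr) (lc := lc) hL
        (fun q hq => (mem_holesOf.mp hq).1) h
      exact mem_pvRect.mpr ⟨hb.1, hb.2⟩
  have hUnodup : (PySem.Set.union (PySem.Set.ofList (pvDiffs L (blockedOf lock (lr : Int) (lc : Int))))
      (pvDiffs L (holesOf lock (lr : Int) (lc : Int)))).Nodup :=
    PySem.Set.nodup_union _ _ (PySem.Set.nodup_ofList _)
  have hRlen : (((pvRect (-(n : Int) + 1) lr (-(n : Int) + 1) lc).length : Int))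
      = ((n : Int) + lr - 1) * ((n : Int) + lc - 1) := by
    rw [length_pvRect]
    have h1 : (((lr : Int) - (-(n : Int) + 1)).toNat : Int) = (n : Int) + lr - 1 := by omega
    have h2 : (((lc : Int) - (-(n : Int) + 1)).toNat : Int) = (n : Int) + lc - 1 := by omega
    push_cast
    rw [h1, h2]
  by_cases hnum : numLock = 0
  · rw [if_pos (by simp [hnum])]
    rw [Bool.eq_iff_iff]
    simp only [List.any_eq_true, PySem.List.mem_pyRange_one, decide_eq_true_eq]
    constructor
    · rintro ⟨dr, hdr, dc, hdc, hcan⟩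
      obtain ⟨hnc, hcnt0⟩ := (hkey dr dc).mp hcan
      have hnm : (dr, dc) ∉ pvDiffs L (holesOf lock (lr : Int) (lc : Int)) := by
        intro hm
        have hpos := List.count_pos_iff.mpr hm
        omega
      have hsu : (dr, dc) ∉ PySem.Set.union
          (PySem.Set.ofList (pvDiffs L (blockedOf lock (lr : Int) (lc : Int))))
          (pvDiffs L (holesOf lock (lr : Int) (lc : Int))) := by
        intro hm
        rcases (PySem.Set.mem_union _ _ _).mp hm with h | h
        · exact hnc ((PySem.Set.mem_ofList _ _).mp h)
        · exact hnm h
      have hlen := (count_missing hUnodup (nodup_pvRect _ _ _ _) hsubU).mpr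
        ⟨(dr, dc), mem_pvRect.mpr ⟨⟨hdr.1, hdr.2⟩, ⟨hdc.1, hdc.2⟩⟩, hsu⟩
      rw [← hRlen]
      exact_mod_cast hlen
    · intro hlt
      have hlen : (PySem.Set.union (PySem.Set.ofList (pvDiffs L (blockedOf lock (lr : Int) (lc : Int))))
          (pvDiffs L (holesOf lock (lr : Int) (lc : Int)))).length
          < (pvRect (-(n : Int) + 1) lr (-(n : Int) + 1) lc).length := by
        rw [← hRlen] at hlt
        exact_mod_cast hlt
      obtain ⟨s, hsR, hsu⟩ := (count_missing hUnodup (nodup_pvRect _ _ _ _) hsubU).mp hlen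
      obtain ⟨dr, dc⟩ := s
      obtain ⟨hdr, hdc⟩ := mem_pvRect.mp hsR
      refine ⟨dr, hdr, dc, hdc, (hkey dr dc).mpr ⟨?_, ?_⟩⟩
      · intro hm
        exact hsu ((PySem.Set.mem_union _ _ _).mpr (Or.inl ((PySem.Set.mem_ofList _ _).mpr hm)))
      · have hnm : (dr, dc) ∉ pvDiffs L (holesOf lock (lr : Int) (lc : Int)) :=
          fun hm => hsu ((PySem.Set.mem_union _ _ _).mpr (Or.inr hm))
        rw [List.count_eq_zero_of_not_mem hnm, hnum]
        rfl
  · rw [if_neg (by simp [hnum])]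
    rw [PySem.Dict.foldl_insert_getD_add_one_eq_counter, PySem.Dict.items_counter]
    rw [Bool.eq_iff_iff, List.any_map]
    simp only [List.any_eq_true, PySem.List.mem_pyRange_one, Function.comp_apply,
      Bool.and_eq_true, beq_iff_eq, Bool.not_eq_true']
    constructor
    · rintro ⟨dr, hdr, dc, hdc, hcan⟩
      obtain ⟨hnc, hcnteq⟩ := (hkey dr dc).mp hcan
      have hmem : (dr, dc) ∈ pvDiffs L (holesOf lock (lr : Int) (lc : Int)) := by
        by_contra hm
        rw [List.count_eq_zero_of_not_mem hm] at hcnteq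
        exact hnum (by exact_mod_cast hcnteq.symm)
      refine ⟨(dr, dc), (PySem.Set.mem_ofList _ _).mpr hmem, hcnteq, ?_⟩
      rw [← Bool.not_eq_true, PySem.Set.contains_iff]
      exact fun h => hnc ((PySem.Set.mem_ofList _ _).mp h)
    · rintro ⟨s, hsm, hcntEq, hncB⟩
      have hmem : s ∈ pvDiffs L (holesOf lock (lr : Int) (lc : Int)) :=
        (PySem.Set.mem_ofList _ _).mp hsm
      have hb := pvDiffs_bounds (lr := lr) (lc := lc) hL
        (fun q hq => (mem_holesOf.mp hq).1) hmem
      obtain ⟨dr, dc⟩ := s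
      refine ⟨dr, hb.1, dc, hb.2, (hkey dr dc).mpr ⟨?_, hcntEq⟩⟩
      intro hm
      have : (PySem.Set.ofList (pvDiffs L (blockedOf lock (lr : Int) (lc : Int)))).contains (dr, dc) = true :=
        (PySem.Set.contains_iff _ _).mpr ((PySem.Set.mem_ofList _ _).mpr hm)
      rw [this] at hncB
      exact Bool.true_eq_false.mp hncB

-- ---- the four-rotation loops in lockstep ----

theorem lockstep (lock : List (List Int)) (lr lc : Nat) (hlr : 0 < lr)
    (numLock : Int) (n : Nat) (hn : 0 < n) (f : Nat) :
    ∀ (M : List (List Int)) (L : List (Int × Int)), pvSq M n →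
      L.Perm (pvOnes M (n : Int) (n : Int)) →
      tryRot (needKOf lock (lr : Int) (lc : Int)) numLock (n : Int) (n : Int) (lr : Int) (lc : Int) f M =
        altLoop (blockedOf lock (lr : Int) (lc : Int)) (holesOf lock (lr : Int) (lc : Int))
          numLock (n : Int) (((n : Int) + lr - 1) * ((n : Int) + lc - 1)) f L := by
  induction f with
  | zero => intro M L _ _; rfl
  | succ k ih =>
    intro M L hSq hL
    have hSq' := pvSq_rotate hSq hn
    have hL' : (L.map (fun q => ((n : Int) - 1 - q.2, q.1))).Perm
        (pvOnes (rotate M) (n : Int) (n : Int)) :=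
      (hL.map _).trans (ones_rot hSq hn)
    have hguard := guard_eq lock lr lc hlr (rotate M) n hn hSq' _ hL' numLock
    simp only [tryRot, altLoop]
    rw [hguard, ih _ _ hSq' hL']

-- ---- the zero-column key ----

theorem pvPairs_zero (a : Int) : pvPairs a 0 = [] := by
  unfold pvPairs
  rw [PySem.List.pyRange_one_eq_nil (le_refl 0)]
  simp

theorem rotate_head_zero {M : List (List Int)} (hM : 0 < M.length)
    (h0 : (PySem.List.pyGetD M 0 []).length = 0) :
    (PySem.List.pyGetD (rotate M) 0 []).length = 0 := by
  conv_lhs => rw [rotate]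
  rw [PySem.List.pyGetD_map_pyRange_of_nonneg _ _ 0 _ le_rfl (by exact_mod_cast hM)]
  simp [h0]

theorem canOpen_zero (M need : List (List Int)) (dr dc numLock : Int)
    (h0 : (PySem.List.pyGetD M 0 []).length = 0) :
    canOpen M need dr dc numLock = ((0 : Int) == numLock) := by
  unfold canOpen
  rw [h0]
  rw [show ((0 : Nat) : Int) = 0 from rfl, pvPairs_zero]
  rfl

theorem lockstep0 (lock : List (List Int)) (lr lc : Nat) (hlr : 0 < lr) (numLock : Int) (kr : Nat)
    (hkr : 0 < kr) (f : Nat) :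
    ∀ (M : List (List Int)), M.length = kr → (PySem.List.pyGetD M 0 []).length = 0 →
      tryRot (needKOf lock (lr : Int) (lc : Int)) numLock (kr : Int) 0 (lr : Int) (lc : Int) f M =
        altLoop (blockedOf lock (lr : Int) (lc : Int)) (holesOf lock (lr : Int) (lc : Int))
          numLock (kr : Int) (((kr : Int) + lr - 1) * ((0 : Int) + lc - 1)) f ([] : List (Int × Int)) := by
  induction f with
  | zero => intro M _ _; rfl
  | succ k ih =>
    intro M hlen h0
    have hlen' : (rotate M).length = kr := by rw [rotate_length, hlen]
    have h0' : (PySem.List.pyGetD (rotate M) 0 []).length = 0 :=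
      rotate_head_zero (by omega) h0
    have hguard : ∀ dr dc : Int,
        canOpen (rotate M) (needKOf lock (lr : Int) (lc : Int)) dr dc numLock =
          ((0 : Int) == numLock) := fun dr dc => canOpen_zero _ _ _ _ _ h0'
    simp only [tryRot, altLoop, List.map_nil]
    simp only [hguard]
    have hB : pvDiffs ([] : List (Int × Int)) (blockedOf lock (lr : Int) (lc : Int)) = [] := rfl
    have hH : pvDiffs ([] : List (Int × Int)) (holesOf lock (lr : Int) (lc : Int)) = [] := rfl
    simp only [hB, hH]
    have hcond : ((PySem.List.pyRange (-(kr : Int) + 1) (lr : Int) 1).any (fun _ =>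
          (PySem.List.pyRange (-0 + 1) (lc : Int) 1).any (fun _ => ((0 : Int) == numLock))))
        = (if numLock == 0 then
             decide (((PySem.Set.union (PySem.Set.ofList ([] : List (Int × Int))) ([] : List (Int × Int))).length : Int)
               < ((kr : Int) + lr - 1) * ((0 : Int) + lc - 1))
           else ((([] : List (Int × Int)).foldl (fun d s => d.insert s (d.getD s 0 + 1))
               (PySem.Dict.empty : PySem.Dict (Int × Int) Int)).items.any
             (fun sm => sm.2 == numLock && !((PySem.Set.ofList ([] : List (Int × Int))).contains sm.1)))) := by
      have hulen : ((PySem.Set.union (PySem.Set.ofList ([] : List (Int × Int)))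
          ([] : List (Int × Int))).length : Int) = 0 := rfl
      by_cases hnum : numLock = 0
      · rw [if_pos (by simp [hnum]), hulen]
        rw [Bool.eq_iff_iff]
        simp only [List.any_eq_true, PySem.List.mem_pyRange_one, decide_eq_true_eq, hnum,
          beq_self_eq_true, and_true]
        constructor
        · rintro ⟨dr, hdr, dc, hdc⟩
          have h1 : (0 : Int) < (kr : Int) + lr - 1 := by omega
          have h2 : (0 : Int) < (0 : Int) + lc - 1 := by
            have := hdc.2
            omega
          exact mul_pos h1 h2
        · intro hpos
          have h2 : (0 : Int) < (0 : Int) + lc - 1 := by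
            by_contra hle
            push Not at hle
            have := mul_nonpos_of_nonneg_of_nonpos
              (show (0 : Int) ≤ (kr : Int) + lr - 1 by omega) hle
            omega
          exact ⟨0, ⟨by omega, by omega⟩, 1, by omega, by omega⟩
      · rw [if_neg (by simp [hnum])]
        have hz : (((0 : Int) == numLock)) = false := by
          simp
          omega
        rw [hz]
        have hempty : ((PySem.Dict.empty : PySem.Dict (Int × Int) Int)).items = [] := rfl
        rw [List.foldl_nil, hempty]
        simp [List.any_eq_false]
    rw [hcond, ih _ hlen' h0']

-- ---- the two header computations agree ----

theorem sum_idx_eq (x : List (List Int)) (m : Nat) :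
    ((pvPairs (x.length : Int) (m : Int)).map (fun p => pvIdx x p.1 p.2)).sum
      = (x.map (fun row => (row.take m).sum)).sum := by
  rw [pvPairs_natCast, List.map_flatMap]
  rw [List.flatMap_def, List.sum_flatten, List.map_map]
  have hrow : ∀ r : Nat, (((List.range m).map (fun c : Nat => ((r : Int), (c : Int)))).map
      (fun p => pvIdx x p.1 p.2)).sum = ((x.getD r []).take m).sum := by
    intro r
    rw [List.map_map]
    have : ((fun p : Int × Int => pvIdx x p.1 p.2) ∘ fun c : Nat => ((r : Int), (c : Int)))
        = fun c : Nat => (x.getD r []).getD c 0 := by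
      funext c; exact pvIdx_natCast x r c
    rw [this, sum_getD_range_row]
  simp only [Function.comp_def, hrow]
  rw [map_range_getD x (fun row => (row.take m).sum)]

theorem slice_sum_eq (x : List (List Int)) (m : Nat) :
    (x.map (fun row => (PySem.List.slice row none (some (m : Int))).sum)).sum
      = (x.map (fun row => (row.take m).sum)).sum := by
  congr 1
  apply List.map_congr_left
  intro row _
  rw [PySem.List.slice_to _ (by positivity)]
  simp

theorem numKey_eq (x : List (List Int)) (m : Nat) :
    (pvPairs (x.length : Int) (m : Int)).foldl (fun acc p => acc + pvIdx x p.1 p.2) 0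
      = (x.map (fun row => (row.take m).sum)).sum := by
  rw [PySem.List.foldl_add, zero_add, sum_idx_eq]

theorem numLock_eq (lock : List (List Int)) (a b : Nat) :
    (pvPairs (a : Int) (b : Int)).foldl (fun acc p => acc + (1 - pvIdx lock p.1 p.2)) 0
      = (a : Int) * (b : Int) - ((pvPairs (a : Int) (b : Int)).map (fun p => pvIdx lock p.1 p.2)).sum := by
  rw [PySem.List.foldl_add, zero_add, sum_one_sub,
    length_pvPairs]
  push_cast
  ring

-- ===== VERDICT (by name: the statement is the Claim_ definition above) =====
theorem solution_spec : Claim_equal_solution := by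
  intro key lock _ hPre
  obtain ⟨hk0, hl0, hkrows, hlrows, hdisj⟩ := hPre
  have hhk : PySem.List.pyGetD key 0 ([] : List Int) = key.headD [] := by
    cases key <;> simp [PySem.List.pyGetD_zero]
  have hhl : PySem.List.pyGetD lock 0 ([] : List Int) = lock.headD [] := by
    cases lock <;> simp [PySem.List.pyGetD_zero]
  unfold Spec_solution solution solution_alt
  simp only [hhk, hhl]
  rw [numKey_eq key (key.headD []).length,
    numLock_eq lock lock.length (lock.headD []).length,
    sum_idx_eq lock (lock.headD []).length, slice_sum_eq key (key.headD []).length]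
  by_cases hlt : ((key.map (fun row => (row.take (key.headD []).length).sum)).sum
      < (lock.length : Int) * ((lock.headD []).length : Int)
        - (lock.map (fun row => (row.take (lock.headD []).length).sum)).sum)
  · rw [if_pos hlt, if_pos hlt]
  · rw [if_neg hlt, if_neg hlt]
    rcases hdisj with h | hkc0 | ⟨hkhead, hkrows'⟩
    · exact absurd h hlt
    · rw [hkc0]
      have honese : pvOnes key (key.length : Int) ((0 : Nat) : Int) = [] := by
        rw [show ((0 : Nat) : Int) = 0 from rfl, pvOnes, pvPairs_zero]; rfl
      rw [honese]
      rw [show ((0 : Nat) : Int) = 0 from rfl]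
      exact lockstep0 lock lock.length (lock.headD []).length
        (List.length_pos_iff.mpr hl0) _ key.length
        (List.length_pos_iff.mpr hk0) 4 key rfl (by rw [hhk, hkc0])
    · rw [hkhead]
      exact lockstep lock lock.length (lock.headD []).length
        (List.length_pos_iff.mpr hl0) _ key.length
        (List.length_pos_iff.mpr hk0) 4 key _
        ⟨rfl, by rw [hhk, hkhead], hkrows'⟩ (List.Perm.refl _)
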